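-- pv_equiv track=rewrite | github.com/viniciusccosta/RichSort | richsort/algorithms.py | _create_visual_array
-- ===== SOURCE A (Python) =====
-- from typing import Any, Dict, List
--
-- def _create_visual_array(
--
--     array: List[int],
--     highlight_indices: List[int],
--     sorted_elements: int,
--     swap_highlight: bool = False,
-- ) -> List[str]:
--     """Create visual representation of array with highlighting."""
--     visual_array = []
--     length = len(array)
--
--     for i, val in enumerate(array):
--         if i in highlight_indices:
--             if swap_highlight:
--                 visual_array.append(f"[green on white] {val} [/]")
--             elif i == highlight_indices[0]:
--                 visual_array.append(f"[magenta on white] {val} [/]")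
--             else:
--                 visual_array.append(f"[cyan on white] {val} [/]")
--         elif i >= length - sorted_elements:
--             visual_array.append(f"[dim] {val} [/]")
--         else:
--             visual_array.append(f"[white] {val} [/]")
--
--     return visual_array
-- ===== SOURCE B (Python) =====
-- from typing import List
--
--
-- def _create_visual_array(
--     array: List[int],
--     highlight_indices: List[int],
--     sorted_elements: int,
--     swap_highlight: bool = False,
-- ) -> List[str]:
--     """Create visual representation of array with highlighting.
--
--     Layered overwrites: default pass, then the sorted tail, then the
--     highlighted positions (highlight > sorted > default precedence).
--     """
--     length = len(array)
--     visual = [f"[white] {v} [/]" for v in array]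
--     for i in range(max(0, length - sorted_elements), length):
--         visual[i] = f"[dim] {array[i]} [/]"
--     for idx in highlight_indices:
--         if 0 <= idx < length:
--             if swap_highlight:
--                 visual[idx] = f"[green on white] {array[idx]} [/]"
--             elif idx == highlight_indices[0]:
--                 visual[idx] = f"[magenta on white] {array[idx]} [/]"
--             else:
--                 visual[idx] = f"[cyan on white] {array[idx]} [/]"
--     return visual
-- ===== Notes on version B (the rewrite author's own statement) =====
-- stated objective: alternative
-- what changed: Replaces A's per-element branch cascade with a membership test inside the loop by three layered overwrite passes (default map, sorted-tail range write, highlight scatter write), turning the O(n*h) per-index membership scan into one pass over the highlight list.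
import Mathlib
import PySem

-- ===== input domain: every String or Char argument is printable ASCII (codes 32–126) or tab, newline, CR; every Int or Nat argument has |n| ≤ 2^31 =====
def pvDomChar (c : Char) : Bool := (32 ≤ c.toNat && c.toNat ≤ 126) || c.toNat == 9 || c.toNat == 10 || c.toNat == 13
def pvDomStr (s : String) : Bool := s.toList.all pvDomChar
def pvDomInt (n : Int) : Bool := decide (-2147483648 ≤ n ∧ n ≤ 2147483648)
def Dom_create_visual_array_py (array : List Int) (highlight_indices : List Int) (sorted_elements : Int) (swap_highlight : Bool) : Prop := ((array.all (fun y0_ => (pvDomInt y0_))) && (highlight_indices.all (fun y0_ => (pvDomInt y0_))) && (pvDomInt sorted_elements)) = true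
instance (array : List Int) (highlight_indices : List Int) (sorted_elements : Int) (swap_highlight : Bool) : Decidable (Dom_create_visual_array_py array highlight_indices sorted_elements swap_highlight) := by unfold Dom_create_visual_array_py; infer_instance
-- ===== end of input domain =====

-- B replaces A's per-element branch cascade (membership test per index) by three layered
-- overwrite passes: default map, sorted-tail range overwrite, highlight scatter overwrite.

-- ===== PORT A =====
-- literal port of A's loop: append one formatted string per (i, val) of enumerate(array).
-- `highlight_indices[0]` is only evaluated when `i ∈ highlight_indices` (list nonempty),
-- so `headD 0` is exact there.
def create_visual_array_py (array : List Int) (highlight_indices : List Int) (sorted_elements : Int) (swap_highlight : Bool) : List String :=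
  let length : Int := array.length
  (PySem.List.enumerate array 0).foldl
    (fun visual_array iv =>
      let i := iv.1
      let val := iv.2
      if highlight_indices.contains i then
        if swap_highlight then
          visual_array ++ ["[green on white] " ++ PySem.Int.toStr val ++ " [/]"]
        else if i = highlight_indices.headD 0 then
          visual_array ++ ["[magenta on white] " ++ PySem.Int.toStr val ++ " [/]"]
        else
          visual_array ++ ["[cyan on white] " ++ PySem.Int.toStr val ++ " [/]"]
      else if length - sorted_elements ≤ i then
        visual_array ++ ["[dim] " ++ PySem.Int.toStr val ++ " [/]"]
      else
        visual_array ++ ["[white] " ++ PySem.Int.toStr val ++ " [/]"])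
    []

-- ===== PORT B =====
-- literal port of Source B; `array[i]` is read with `getD … 0`, exact because every written
-- index satisfies 0 ≤ i < len(array); `visual[i] = …` is `List.set`.
def create_visual_array_py_alt (array : List Int) (highlight_indices : List Int) (sorted_elements : Int) (swap_highlight : Bool) : List String :=
  let length : Int := array.length
  let visual0 := array.map (fun v => "[white] " ++ PySem.Int.toStr v ++ " [/]")
  let visual1 := (PySem.List.pyRange (max 0 (length - sorted_elements)) length 1).foldl
    (fun vis i => vis.set i.toNat ("[dim] " ++ PySem.Int.toStr (array.getD i.toNat 0) ++ " [/]")) visual0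
  highlight_indices.foldl
    (fun vis idx =>
      if 0 ≤ idx ∧ idx < length then
        if swap_highlight then
          vis.set idx.toNat ("[green on white] " ++ PySem.Int.toStr (array.getD idx.toNat 0) ++ " [/]")
        else if idx = highlight_indices.headD 0 then
          vis.set idx.toNat ("[magenta on white] " ++ PySem.Int.toStr (array.getD idx.toNat 0) ++ " [/]")
        else
          vis.set idx.toNat ("[cyan on white] " ++ PySem.Int.toStr (array.getD idx.toNat 0) ++ " [/]")
      else vis)
    visual1

-- ===== PRECONDITION & SPEC =====
def Spec_create_visual_array_py (array : List Int) (highlight_indices : List Int) (sorted_elements : Int) (swap_highlight : Bool) (out : List String) : Prop := out = create_visual_array_py_alt array highlight_indices sorted_elements swap_highlight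
instance (array : List Int) (highlight_indices : List Int) (sorted_elements : Int) (swap_highlight : Bool) (out : List String) : Decidable (Spec_create_visual_array_py array highlight_indices sorted_elements swap_highlight out) := by unfold Spec_create_visual_array_py; infer_instance

-- ===== CLAIM (what is proved, stated in full; the proofs are below) =====
def Claim_equal_create_visual_array_py : Prop := ∀ (array : List Int) (highlight_indices : List Int) (sorted_elements : Int) (swap_highlight : Bool), Dom_create_visual_array_py array highlight_indices sorted_elements swap_highlight → Spec_create_visual_array_py array highlight_indices sorted_elements swap_highlight (create_visual_array_py array highlight_indices sorted_elements swap_highlight)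

-- ===== LEMMAS AND PROOFS =====

-- the per-index colour A assigns (A's branch cascade, as a function of (i, val))
def pvColor (highlight_indices : List Int) (length sorted_elements : Int) (swap_highlight : Bool) (iv : Int × Int) : String :=
  if highlight_indices.contains iv.1 then
    if swap_highlight then "[green on white] " ++ PySem.Int.toStr iv.2 ++ " [/]"
    else if iv.1 = highlight_indices.headD 0 then "[magenta on white] " ++ PySem.Int.toStr iv.2 ++ " [/]"
    else "[cyan on white] " ++ PySem.Int.toStr iv.2 ++ " [/]"
  else if length - sorted_elements ≤ iv.1 then "[dim] " ++ PySem.Int.toStr iv.2 ++ " [/]"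
  else "[white] " ++ PySem.Int.toStr iv.2 ++ " [/]"

theorem cvpA_eq_map (array highlight_indices : List Int) (sorted_elements : Int) (swap_highlight : Bool) :
    create_visual_array_py array highlight_indices sorted_elements swap_highlight
      = (PySem.List.enumerate array 0).map
          (pvColor highlight_indices (array.length : Int) sorted_elements swap_highlight) := by
  have hbody : (fun (visual_array : List String) (iv : Int × Int) =>
      if highlight_indices.contains iv.1 then
        if swap_highlight then
          visual_array ++ ["[green on white] " ++ PySem.Int.toStr iv.2 ++ " [/]"]
        else if iv.1 = highlight_indices.headD 0 then
          visual_array ++ ["[magenta on white] " ++ PySem.Int.toStr iv.2 ++ " [/]"]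
        else
          visual_array ++ ["[cyan on white] " ++ PySem.Int.toStr iv.2 ++ " [/]"]
      else if (array.length : Int) - sorted_elements ≤ iv.1 then
        visual_array ++ ["[dim] " ++ PySem.Int.toStr iv.2 ++ " [/]"]
      else
        visual_array ++ ["[white] " ++ PySem.Int.toStr iv.2 ++ " [/]"])
      = (fun visual_array iv => visual_array ++
          [pvColor highlight_indices (array.length : Int) sorted_elements swap_highlight iv]) := by
    funext visual_array iv
    simp only [pvColor]
    split_ifs <;> rfl
  show (PySem.List.enumerate array 0).foldl
      (fun (visual_array : List String) (iv : Int × Int) =>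
        if highlight_indices.contains iv.1 then
          if swap_highlight then
            visual_array ++ ["[green on white] " ++ PySem.Int.toStr iv.2 ++ " [/]"]
          else if iv.1 = highlight_indices.headD 0 then
            visual_array ++ ["[magenta on white] " ++ PySem.Int.toStr iv.2 ++ " [/]"]
          else
            visual_array ++ ["[cyan on white] " ++ PySem.Int.toStr iv.2 ++ " [/]"]
        else if (array.length : Int) - sorted_elements ≤ iv.1 then
          visual_array ++ ["[dim] " ++ PySem.Int.toStr iv.2 ++ " [/]"]
        else
          visual_array ++ ["[white] " ++ PySem.Int.toStr iv.2 ++ " [/]"])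
      [] = _
  rw [hbody, PySem.List.foldl_append_singleton_eq_map]
  simp

-- a fold of unconditional writes keeps the length
theorem foldl_set_len (l : List Int) (w : Int → String) (vis : List String) :
    (l.foldl (fun v i => v.set i.toNat (w i)) vis).length = vis.length := by
  induction l generalizing vis with
  | nil => rfl
  | cons a t ih => simp [List.foldl, ih]

-- a fold of guarded writes keeps the length
theorem foldl_setif_len (l : List Int) (Q : Int → Prop) [DecidablePred Q] (w : Int → String) (vis : List String) :
    (l.foldl (fun v i => if Q i then v.set i.toNat (w i) else v) vis).length = vis.length := by
  induction l generalizing vis with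
  | nil => rfl
  | cons a t ih => by_cases h : Q a <;> simp [List.foldl, h, ih]

-- element j after a fold of writes at nonnegative indices: any write at j wins (they are all equal)
theorem foldl_set_get (l : List Int) (hl : ∀ i ∈ l, 0 ≤ i) (w : Int → String)
    (vis : List String) (j : Nat) (hj : j < vis.length) :
    (l.foldl (fun v i => v.set i.toNat (w i)) vis)[j]'(by rw [foldl_set_len]; exact hj)
      = if (j : Int) ∈ l then w j else vis[j] := by
  induction l generalizing vis with
  | nil => simp
  | cons a t ih =>
    have ha : 0 ≤ a := hl a (by simp)
    have ht : ∀ i ∈ t, 0 ≤ i := fun i hi => hl i (by simp [hi])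
    have hj' : j < (vis.set a.toNat (w a)).length := by simpa using hj
    have hstep := ih ht (vis.set a.toNat (w a)) hj'
    simp only [List.foldl_cons]
    rw [hstep, List.getElem_set]
    by_cases hmem : (j : Int) ∈ t
    · simp [hmem]
    · by_cases haj : a = (j : Int)
      · subst haj
        simp [hmem]
      · have haj' : ¬ ((j : Int) = a) := fun h => haj h.symm
        have hne : ¬ (a.toNat = j) := by omega
        simp [hmem, haj', hne]

-- element j after a fold of guarded writes (the guard forces a nonnegative index)
theorem foldl_setif_get (l : List Int) (Q : Int → Prop) [DecidablePred Q] (hQ : ∀ i, Q i → 0 ≤ i)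
    (w : Int → String) (vis : List String) (j : Nat) (hj : j < vis.length) :
    (l.foldl (fun v i => if Q i then v.set i.toNat (w i) else v) vis)[j]'(by rw [foldl_setif_len]; exact hj)
      = if (j : Int) ∈ l ∧ Q (j : Int) then w j else vis[j] := by
  induction l generalizing vis with
  | nil => simp
  | cons a t ih =>
    by_cases hQa : Q a
    · have ha : 0 ≤ a := hQ a hQa
      have hj' : j < (vis.set a.toNat (w a)).length := by simpa using hj
      have hstep := ih (vis.set a.toNat (w a)) hj'
      simp only [List.foldl_cons, hQa, if_true]
      rw [hstep]
      by_cases hmem : (j : Int) ∈ t ∧ Q (j : Int)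
      · simp [hmem]
      · rw [if_neg hmem, List.getElem_set]
        by_cases haj : a = (j : Int)
        · subst haj
          simp [hQa]
        · have hne : ¬ (a.toNat = j) := by omega
          have haj' : ¬ ((j : Int) = a) := fun h => haj h.symm
          simp [hmem, haj', hne]
    · have hstep := ih vis hj
      simp only [List.foldl_cons, hQa, if_false]
      rw [hstep]
      by_cases hmem : (j : Int) ∈ t ∧ Q (j : Int)
      · rw [if_pos hmem, if_pos ⟨List.mem_cons_of_mem _ hmem.1, hmem.2⟩]
      · by_cases haj : a = (j : Int)
        · subst haj
          rw [if_neg hmem, if_neg (by tauto)]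
        · rw [if_neg hmem, if_neg (by
            rintro ⟨hm, hq⟩
            rcases List.mem_cons.1 hm with h | h
            · exact haj h.symm
            · exact hmem ⟨h, hq⟩)]

theorem create_visual_array_py_spec : Claim_equal_create_visual_array_py := by
  intro array highlight_indices sorted_elements swap_highlight _hdom
  unfold Spec_create_visual_array_py create_visual_array_py_alt
  rw [cvpA_eq_map]
  show (PySem.List.enumerate array 0).map
      (pvColor highlight_indices (array.length : Int) sorted_elements swap_highlight)
    = highlight_indices.foldl
        (fun (vis : List String) (idx : Int) =>
          if 0 ≤ idx ∧ idx < (array.length : Int) then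
            if swap_highlight then
              vis.set idx.toNat ("[green on white] " ++ PySem.Int.toStr (array.getD idx.toNat 0) ++ " [/]")
            else if idx = highlight_indices.headD 0 then
              vis.set idx.toNat ("[magenta on white] " ++ PySem.Int.toStr (array.getD idx.toNat 0) ++ " [/]")
            else
              vis.set idx.toNat ("[cyan on white] " ++ PySem.Int.toStr (array.getD idx.toNat 0) ++ " [/]")
          else vis)
        ((PySem.List.pyRange (max 0 ((array.length : Int) - sorted_elements)) (array.length : Int) 1).foldl
          (fun vis i => vis.set i.toNat ("[dim] " ++ PySem.Int.toStr (array.getD i.toNat 0) ++ " [/]"))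
          (array.map (fun v => "[white] " ++ PySem.Int.toStr v ++ " [/]")))
  set L : Int := (array.length : Int) with hL
  set wD : Int → String := fun i => "[dim] " ++ PySem.Int.toStr (array.getD i.toNat 0) ++ " [/]" with hwD
  set wH : Int → String := fun idx =>
    if swap_highlight then "[green on white] " ++ PySem.Int.toStr (array.getD idx.toNat 0) ++ " [/]"
    else if idx = highlight_indices.headD 0 then "[magenta on white] " ++ PySem.Int.toStr (array.getD idx.toNat 0) ++ " [/]"
    else "[cyan on white] " ++ PySem.Int.toStr (array.getD idx.toNat 0) ++ " [/]" with hwH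
  have hbodyH : (fun (vis : List String) (idx : Int) =>
      if 0 ≤ idx ∧ idx < L then
        if swap_highlight then
          vis.set idx.toNat ("[green on white] " ++ PySem.Int.toStr (array.getD idx.toNat 0) ++ " [/]")
        else if idx = highlight_indices.headD 0 then
          vis.set idx.toNat ("[magenta on white] " ++ PySem.Int.toStr (array.getD idx.toNat 0) ++ " [/]")
        else
          vis.set idx.toNat ("[cyan on white] " ++ PySem.Int.toStr (array.getD idx.toNat 0) ++ " [/]")
      else vis)
      = (fun vis idx => if 0 ≤ idx ∧ idx < L then vis.set idx.toNat (wH idx) else vis) := by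
    funext vis idx
    simp only [hwH]
    split_ifs <;> rfl
  rw [hbodyH]
  apply List.ext_getElem
  · simp [foldl_setif_len, foldl_set_len, PySem.List.length_enumerate]
  · intro j hjA hjB
    have hjarr : j < array.length := by
      simpa [PySem.List.length_enumerate] using hjA
    have hvis0 : j < (array.map (fun v => "[white] " ++ PySem.Int.toStr v ++ " [/]")).length := by
      simpa using hjarr
    have hvis1 : j < ((PySem.List.pyRange (max 0 (L - sorted_elements)) L 1).foldl
        (fun vis i => vis.set i.toNat (wD i))
        (array.map (fun v => "[white] " ++ PySem.Int.toStr v ++ " [/]"))).length := by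
      rw [foldl_set_len]; exact hvis0
    have hrange0 : ∀ i ∈ PySem.List.pyRange (max 0 (L - sorted_elements)) L 1, 0 ≤ i := by
      intro i hi
      have := (PySem.List.mem_pyRange_one).1 hi
      omega
    rw [foldl_setif_get highlight_indices (fun idx => 0 ≤ idx ∧ idx < L) (fun i h => h.1) wH _ j hvis1,
        foldl_set_get _ hrange0 wD _ j hvis0]
    have hAj : ((PySem.List.enumerate array 0).map
        (pvColor highlight_indices L sorted_elements swap_highlight))[j]'(by
          simpa [PySem.List.length_enumerate] using hjarr)
        = pvColor highlight_indices L sorted_elements swap_highlight ((j : Int), array[j]) := by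
      simp [PySem.List.getElem_enumerate]
    rw [hAj]
    have hget0 : (array.map (fun v => "[white] " ++ PySem.Int.toStr v ++ " [/]"))[j]'hvis0
        = "[white] " ++ PySem.Int.toStr array[j] ++ " [/]" := by
      simp
    rw [hget0]
    have hgetD : array.getD ((j : Int)).toNat 0 = array[j] := by
      simp [List.getD_eq_getElem?_getD, hjarr]
    have hmemR : ((j : Int) ∈ PySem.List.pyRange (max 0 (L - sorted_elements)) L 1)
        ↔ (L - sorted_elements ≤ (j : Int)) := by
      rw [PySem.List.mem_pyRange_one]
      have hjL : (j : Int) < L := by omega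
      constructor
      · intro h; omega
      · intro h; exact ⟨by omega, hjL⟩
    have hjL : (j : Int) < L := by omega
    simp only [pvColor, hwH, hwD, hgetD, hmemR]
    by_cases hmem : (j : Int) ∈ highlight_indices
    · simp [hmem, hjL]
    · simp only [List.contains_iff_mem, hmem, if_false, false_and]
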